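-- pv_equiv track=rewrite | github.com/Zaneham/IBM-system360-LSP | server/system360_lsp_server.py | _get_word_at_position
-- ===== SOURCE A (Python) =====
-- from typing import Dict, List, Optional, Tuple, Any
--
-- def _get_word_at_position(text: str, position: Dict[str, int]) -> Optional[str]:
--     """Extract the word at the given position."""
--     lines = text.split('\n')
--     line_num = position['line']
--     col = position['character']
--
--     if line_num >= len(lines):
--         return None
--
--     line = lines[line_num]
--     if col >= len(line):
--         return None
--
--     # Find word boundaries
--     start = col
--     while start > 0 and (line[start-1].isalnum() or line[start-1] == '-'):
--         start -= 1
--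
--     end = col
--     while end < len(line) and (line[end].isalnum() or line[end] == '-'):
--         end += 1
--
--     if start == end:
--         return None
--
--     return line[start:end]
-- ===== SOURCE B (Python) =====
-- def _get_word_at_position(text, position):
--     """Extract the word at the given position.
--
--     Single left-to-right scan over the line: walk maximal word-character
--     runs from the start of the line and return the first run (s, e) with
--     s <= col <= e (col == e covers the cursor-just-after-a-word case).
--     """
--     lines = text.split('\n')
--     line_num = position['line']
--     col = position['character']
--
--     if line_num >= len(lines):
--         return None
--
--     line = lines[line_num]
--     if col >= len(line):
--         return None
--
--     n = len(line)
--     i = 0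
--     while i <= col:
--         if line[i].isalnum() or line[i] == '-':
--             e = i + 1
--             while e < n and (line[e].isalnum() or line[e] == '-'):
--                 e += 1
--             if col <= e:
--                 return line[i:e]
--             i = e
--         else:
--             i += 1
--     return None
-- ===== Notes on version B (the rewrite author's own statement) =====
-- stated objective: alternative
-- what changed: Instead of expanding left and right from the cursor column, B scans the line once left-to-right over maximal word-character runs and returns the first run (s,e) with s <= col <= e (col == e inclusively, matching the cursor-just-after-a-word case).
-- outside the precondition, e.g. on _get_word_at_position('ab cd', {'line': 0, 'character': -1}): A returns '', B returns None; on _get_word_at_position('ab', {'line': 0, 'character': -2}): A returns 'ab', B returns None; on _get_word_at_position('\n', {'character': 0}): A raises KeyError, B raises KeyError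
import Mathlib
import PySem

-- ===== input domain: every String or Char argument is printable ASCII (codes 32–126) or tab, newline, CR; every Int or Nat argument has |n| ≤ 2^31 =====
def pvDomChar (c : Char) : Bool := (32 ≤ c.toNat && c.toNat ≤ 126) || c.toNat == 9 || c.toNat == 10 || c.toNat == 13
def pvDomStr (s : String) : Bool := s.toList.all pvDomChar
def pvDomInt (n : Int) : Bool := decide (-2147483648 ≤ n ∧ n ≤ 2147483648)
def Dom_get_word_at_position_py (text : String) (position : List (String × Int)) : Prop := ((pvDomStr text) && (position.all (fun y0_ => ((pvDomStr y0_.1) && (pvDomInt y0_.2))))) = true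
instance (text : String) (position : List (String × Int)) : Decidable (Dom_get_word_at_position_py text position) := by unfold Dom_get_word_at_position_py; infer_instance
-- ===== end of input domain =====

-- B replaces A's bidirectional expansion from the cursor column by a single left-to-right
-- scan over maximal word-character runs (alternative decomposition; same cost).


-- ===== PORT A =====
-- the char predicate `c.isalnum() or c == '-'`
def pvIsWord (c : Char) : Bool := PySem.Chars.isalnum c || c == '-'

-- `k < len(L) and (L[k].isalnum() or L[k] == '-')` — the combined bound-and-word test of
-- both Python while-loop conditions (out of range reads the non-word default ' ')
def pvWordAt (L : List Char) (k : Nat) : Bool := pvIsWord (L.getD k ' ')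

theorem pvWordAt_lt {L : List Char} {k : Nat} (h : pvWordAt L k = true) : k < L.length := by
  by_contra hk
  rw [pvWordAt, List.getD_eq_default _ _ (by omega)] at h
  exact absurd h (by decide)

-- A's first loop: `start = col; while start > 0 and isword(line[start-1]): start -= 1`
def pvScanL (L : List Char) : Nat → Nat
  | 0 => 0
  | s + 1 => if pvWordAt L s then pvScanL L s else s + 1

-- A's second loop (also B's inner loop): `while e < len(line) and isword(line[e]): e += 1`
def pvScanR (L : List Char) (i : Nat) : Nat :=
  if h : pvWordAt L i then pvScanR L (i + 1) else i
termination_by L.length - i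
decreasing_by have := pvWordAt_lt h; omega

def get_word_at_position_py (text : String) (position : List (String × Int)) : Option String :=
  let lines := (PySem.Str.split? text "\n").getD []   -- sep "\n" ≠ "": split? is never none
  match (PySem.Dict.ofList position).get? "line", (PySem.Dict.ofList position).get? "character" with
  | some line_num, some col =>
    if line_num ≥ (lines.length : Int) then none
    else
      match PySem.List.pyGet? lines line_num with
      | none => none        -- Python: IndexError (line_num < -len(lines); outside Pre_)
      | some line =>
        let L := line.toList
        if col ≥ (L.length : Int) then none
        else
          -- below here Pre_ gives 0 ≤ col, so col.toNat is Python's col exactly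
          let s := pvScanL L col.toNat
          let e := pvScanR L col.toNat
          if s = e then none
          else some (String.ofList ((L.drop s).take (e - s)))   -- line[s:e], exact for 0 ≤ s ≤ e
  | _, _ => none            -- Python: KeyError (outside Pre_)

-- ===== PORT B =====
-- needed only for pvFindRun's termination measure
theorem pvScanR_ge (L : List Char) (i : Nat) : i ≤ pvScanR L i := by
  fun_induction pvScanR with
  | case1 i h ih => omega
  | case2 i h => omega

-- B's outer loop: walk run starts left to right until a run (i, e) with i ≤ col ≤ e is found
def pvFindRun (L : List Char) (col : Nat) (i : Nat) : Option (List Char) :=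
  if hi : i ≤ col then
    if pvWordAt L i then
      let e := pvScanR L (i + 1)
      if col ≤ e then some ((L.drop i).take (e - i))   -- line[i:e]
      else pvFindRun L col e
    else pvFindRun L col (i + 1)
  else none
termination_by col + 1 - i
decreasing_by
  · have := pvScanR_ge L (i + 1); omega
  · omega

def get_word_at_position_py_alt (text : String) (position : List (String × Int)) : Option String :=
  let lines := (PySem.Str.split? text "\n").getD []   -- sep "\n" ≠ "": split? is never none
  -- the two dict lookups and the Option case splits are written with Option.casesOn
  -- (none = Python's KeyError / IndexError, both outside Pre_)
  ((PySem.Dict.ofList position).get? "line").casesOn none (fun line_num =>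
    ((PySem.Dict.ofList position).get? "character").casesOn none (fun col =>
      if line_num ≥ (lines.length : Int) then none
      else
        (PySem.List.pyGet? lines line_num).casesOn none (fun line =>
          let L := line.toList
          if col ≥ (L.length : Int) then none
          else Option.map String.ofList (pvFindRun L col.toNat 0))))

-- ===== PRECONDITION & SPEC =====
-- Pre_ requires the 'line' and 'character' keys to be present (A raises KeyError otherwise),
-- line ≥ -len(lines) (A raises IndexError below that), and character ≥ 0: a negative
-- character is a malformed LSP position, outside the function's natural domain, on which A
-- mixes negative-index wraparound into its scans — sometimes raising IndexError and otherwise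
-- returning accidental values such as '' (not a word) or a word the cursor is nowhere near.
def Pre_get_word_at_position_py (text : String) (position : List (String × Int)) : Prop :=
  ((PySem.Dict.ofList position).get? "line").isSome = true ∧
  ((PySem.Dict.ofList position).get? "character").isSome = true ∧
  0 ≤ ((PySem.Dict.ofList position).get? "character").getD 0 ∧
  -(((PySem.Str.split? text "\n").getD []).length : Int) ≤ ((PySem.Dict.ofList position).get? "line").getD 0

instance (text : String) (position : List (String × Int)) : Decidable (Pre_get_word_at_position_py text position) := by unfold Pre_get_word_at_position_py; infer_instance

def pvWitness_get_word_at_position_py : String × (List (String × Int)) :=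
  ("hello-world foo", [("line", 0), ("character", 3)])

def Spec_get_word_at_position_py (text : String) (position : List (String × Int)) (out : Option String) : Prop := out = get_word_at_position_py_alt text position
instance (text : String) (position : List (String × Int)) (out : Option String) : Decidable (Spec_get_word_at_position_py text position out) := by unfold Spec_get_word_at_position_py; infer_instance

-- ===== CLAIM (what is proved, stated in full; the proofs are below) =====
def Claim_equal_get_word_at_position_py : Prop := ∀ (text : String) (position : List (String × Int)), Dom_get_word_at_position_py text position → Pre_get_word_at_position_py text position → Spec_get_word_at_position_py text position (get_word_at_position_py text position)

-- ===== LEMMAS AND PROOFS =====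

theorem pvScanR_word (L : List Char) (i : Nat) :
    ∀ k, i ≤ k → k < pvScanR L i → pvWordAt L k = true := by
  fun_induction pvScanR with
  | case1 i h ih =>
    intro k hk1 hk2
    rcases Nat.eq_or_lt_of_le hk1 with rfl | hlt
    · exact h
    · exact ih k hlt hk2
  | case2 i h =>
    intro k hk1 hk2; omega

theorem pvScanR_stop (L : List Char) (i : Nat) : pvWordAt L (pvScanR L i) = false := by
  fun_induction pvScanR with
  | case1 i h ih => exact ih
  | case2 i h => simpa using h

theorem pvScanR_of_not_word {L : List Char} {i : Nat} (h : pvWordAt L i = false) :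
    pvScanR L i = i := by
  rw [pvScanR]; simp [h]

-- scanning to the right from anywhere inside a block of word characters ends at the same place
theorem pvScanR_congr (L : List Char) (i : Nat) :
    ∀ j, i ≤ j → (∀ k, i ≤ k → k < j → pvWordAt L k = true) → pvScanR L i = pvScanR L j := by
  intro j
  induction j with
  | zero => intro hij _; have : i = 0 := by omega
            subst this; rfl
  | succ j ih =>
    intro hij hw
    rcases Nat.eq_or_lt_of_le hij with heq | hlt
    · rw [heq]
    · have hj : i ≤ j := by omega
      have hstep : pvScanR L j = pvScanR L (j + 1) := by
        rw [pvScanR]; simp [hw j hj (by omega)]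
      rw [ih hj (fun k h1 h2 => hw k h1 (by omega)), hstep]

theorem pvScanL_le (L : List Char) (c : Nat) : pvScanL L c ≤ c := by
  induction c with
  | zero => simp [pvScanL]
  | succ c ih =>
    rw [pvScanL]
    split
    · omega
    · omega

theorem pvScanL_word (L : List Char) (c : Nat) :
    ∀ k, pvScanL L c ≤ k → k < c → pvWordAt L k = true := by
  induction c with
  | zero => intro k h1 h2; omega
  | succ c ih =>
    rw [pvScanL]
    split
    · intro k h1 h2
      rcases Nat.lt_or_ge k c with hk | hk
      · exact ih k h1 hk
      · have : k = c := by omega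
        subst this; assumption
    · intro k h1 h2; omega

-- minimality: any i from which the characters up to c are all word characters is ≥ scanL c
theorem pvScanL_min (L : List Char) (i : Nat) :
    ∀ c, i ≤ c → (∀ k, i ≤ k → k < c → pvWordAt L k = true) → pvScanL L c ≤ i := by
  intro c
  induction c with
  | zero => intro hic _; simp [pvScanL]
  | succ c ih =>
    intro hic hw
    rcases Nat.eq_or_lt_of_le hic with heq | hlt
    · rw [← heq]; exact pvScanL_le L i
    · have hic' : i ≤ c := by omega
      have hwc : pvWordAt L c = true := hw c hic' (by omega)
      rw [pvScanL]; simp only [hwc, if_true]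
      exact ih hic' (fun k h1 h2 => hw k h1 (by omega))

-- the heart of the equivalence: B's forward run scan started at any i ≤ scanL col returns
-- exactly A's expansion result around col
theorem pvFindRun_eq (L : List Char) (col : Nat) :
    ∀ i, i ≤ pvScanL L col →
      pvFindRun L col i =
        (if pvScanL L col = pvScanR L col then none
         else some ((L.drop (pvScanL L col)).take (pvScanR L col - pvScanL L col))) := by
  intro i
  fun_induction pvFindRun L col i with
  | case1 x hx hw e hce =>
    intro hs
    have hex : pvScanR L x = pvScanR L (x + 1) := by rw [pvScanR]; simp [hw]
    have hseg : ∀ k, x ≤ k → k < col → pvWordAt L k = true := by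
      intro k h1 h2
      exact pvScanR_word L x k h1 (by rw [hex]; omega)
    have hsx : pvScanL L col = x :=
      le_antisymm (pvScanL_min L x col hx hseg) hs
    have he : pvScanR L col = pvScanR L (x + 1) := by
      rw [← pvScanR_congr L x col hx hseg, hex]
    have hne : pvScanL L col ≠ pvScanR L col := by
      intro h
      have hstop := pvScanR_stop L x
      rw [hex, ← he, ← h, hsx] at hstop
      simp [hstop] at hw
    rw [if_neg hne, hsx, he]
  | case2 x hx hw e hce ih =>
    intro hs
    have hex : pvScanR L x = pvScanR L (x + 1) := by rw [pvScanR]; simp [hw]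
    have hlt : pvScanR L (x + 1) < col := by omega
    have hes : pvScanR L (x + 1) ≤ pvScanL L col := by
      by_contra hcon
      have hword := pvScanL_word L col (pvScanR L (x + 1)) (by omega) hlt
      have hstop := pvScanR_stop L x
      rw [hex] at hstop
      rw [hstop] at hword; exact absurd hword (by decide)
    exact ih hes
  | case3 x hx hw ih =>
    intro hs
    have hwf : pvWordAt L x = false := by simpa using hw
    rcases Nat.eq_or_lt_of_le hx with heq | hlt
    · -- x = col: no run touches col; both sides are none
      have hsle := pvScanL_le L col
      have hscol : pvScanL L col = col := by omega
      have hecol : pvScanR L col = col := pvScanR_of_not_word (heq ▸ hwf)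
      rw [pvFindRun, heq]
      simp [hscol, hecol]
    · -- x < col: x is strictly left of the word start
      have hxs : x < pvScanL L col := by
        rcases Nat.eq_or_lt_of_le hs with heq2 | h; swap
        · exact h
        · exfalso
          have := pvScanL_word L col x (by omega) hlt
          rw [this] at hwf; cases hwf
      exact ih (by omega)
  | case4 x hx =>
    intro hs
    have := pvScanL_le L col
    omega

-- ===== VERDICT (by name: the statement is the Claim_ definition above) =====
theorem get_word_at_position_py_spec : Claim_equal_get_word_at_position_py := by
  intro text position _hdom _hpre
  unfold Spec_get_word_at_position_py get_word_at_position_py get_word_at_position_py_alt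
  cases (PySem.Dict.ofList position).get? "line" with
  | none => rfl
  | some ln =>
  cases (PySem.Dict.ofList position).get? "character" with
  | none => rfl
  | some col =>
  simp only
  split
  · rfl
  · cases PySem.List.pyGet? ((PySem.Str.split? text "\n").getD []) ln with
    | none => rfl
    | some line =>
    simp only
    split
    · rfl
    · rw [pvFindRun_eq line.toList col.toNat 0 (Nat.zero_le _)]
      split
      · rfl
      · rfl
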